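-- pv_equiv track=rewrite | github.com/OohpiEr/FIT3155-S1-2022 | Assignment 3/q2/j/myzip_j.py | encodeElias
-- ===== SOURCE A (Python) =====
-- def encodeElias(binaryStream, num):
--     num += 1    # Non-zero range
--     totalNumBits = num.bit_length()
--     bits = num
--     padNumBits = totalNumBits   # Num bits of the number itself
--     while padNumBits > 1:
--         pad = padNumBits - 1
--         padNumBits = pad.bit_length()
--         pad = pad ^ (1 << (padNumBits - 1))     # Flipping the first bit
--         pad = pad << totalNumBits
--         bits += pad
--         totalNumBits += padNumBits
--
--     binaryStream = binaryStream << totalNumBits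
--     binaryStream += bits
--
--     return binaryStream
-- ===== SOURCE B (Python) =====
-- def _chain(L):
--     # Recursive Elias-omega length chain for a chunk of bit-width L:
--     # returns (value, width) of the concatenated length prefixes.
--     if L <= 1:
--         return (0, 0)
--     pad = L - 1
--     w = pad.bit_length()
--     s = pad ^ (1 << (w - 1))        # strip the leading bit
--     pv, pw = _chain(w)
--     return ((pv << w) + s, pw + w)
--
-- def encodeElias(binaryStream, num):
--     n = num + 1
--     L = n.bit_length()
--     pv, pw = _chain(L)
--     return (binaryStream << (L + pw)) + ((pv << L) + n)
-- ===== Notes on version B (the rewrite author's own statement) =====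
-- stated objective: alternative
-- what changed: A's while-loop that accumulates the Elias length-prefixes into a growing integer/width pair is replaced by a recursive helper computing the length chain as a (value, width) pair following the Elias-omega recurrence, with a single combined shift of the stream at the end.
import Mathlib
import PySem

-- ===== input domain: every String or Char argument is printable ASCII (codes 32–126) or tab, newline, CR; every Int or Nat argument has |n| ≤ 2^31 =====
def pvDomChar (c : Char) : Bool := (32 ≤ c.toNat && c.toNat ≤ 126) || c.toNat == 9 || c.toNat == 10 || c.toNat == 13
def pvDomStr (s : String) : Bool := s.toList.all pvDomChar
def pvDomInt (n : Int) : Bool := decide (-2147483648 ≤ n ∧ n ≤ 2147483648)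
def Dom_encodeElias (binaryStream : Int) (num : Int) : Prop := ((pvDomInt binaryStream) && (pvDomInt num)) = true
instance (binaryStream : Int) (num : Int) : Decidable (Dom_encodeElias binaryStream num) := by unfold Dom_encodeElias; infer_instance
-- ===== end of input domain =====

-- B replaces A's accumulator while-loop over shrinking bit-lengths by a recursive helper
-- computing the Elias length-chain as a (value, width) pair (objective: alternative decomposition).

-- termination helper for both ports: bit_length(m) ≤ m for m ≥ 1 (cited by decreasing_by)
theorem pvBitLen_le (m : Nat) (h : 1 ≤ m) : PySem.Int.bitLength (m : Int) ≤ m := by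
  by_cases h0 : PySem.Int.bitLength (m : Int) = 0
  · omega
  · have h1 := PySem.Int.two_pow_bitLength_le (m : Int) (by exact_mod_cast (by omega : m ≠ 0))
    have h2 := Nat.lt_two_pow_self (n := PySem.Int.bitLength (m : Int) - 1)
    simp only [Int.natAbs_natCast] at h1
    omega

-- ===== PORT A =====
-- widths (bit lengths) are nonnegative Python ints, kept as Nat; x << k is x <<< k (exact, k ≥ 0)
def eliasLoopA (bits : Int) (totalNumBits padNumBits : Nat) : Int × Nat :=
  if _h : 1 < padNumBits then
    let pad := padNumBits - 1
    let padNumBits' := PySem.Int.bitLength (pad : Int)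
    let pad' := pad ^^^ (1 <<< (padNumBits' - 1))   -- flipping the first bit
    eliasLoopA (bits + ((pad' <<< totalNumBits : Nat) : Int)) (totalNumBits + padNumBits') padNumBits'
  else (bits, totalNumBits)
termination_by padNumBits
decreasing_by
  have : PySem.Int.bitLength ((padNumBits - 1 : Nat) : Int) ≤ padNumBits - 1 :=
    pvBitLen_le _ (by omega)
  omega

def encodeElias (binaryStream : Int) (num : Int) : Int :=
  let num := num + 1          -- Non-zero range
  let totalNumBits := PySem.Int.bitLength num
  let bits := num
  let r := eliasLoopA bits totalNumBits totalNumBits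
  (binaryStream <<< r.2) + r.1

-- ===== PORT B =====
-- recursive Elias length-chain: (value, width) of the concatenated length prefixes for width L
def eliasChain (L : Nat) : Nat × Nat :=
  if _h : 1 < L then
    let pad := L - 1
    let w := PySem.Int.bitLength (pad : Int)
    let s := pad ^^^ (1 <<< (w - 1))   -- strip the leading bit
    let c := eliasChain w
    ((c.1 <<< w) + s, c.2 + w)
  else (0, 0)
termination_by L
decreasing_by
  have : PySem.Int.bitLength ((L - 1 : Nat) : Int) ≤ L - 1 := pvBitLen_le _ (by omega)
  omega

def encodeElias_alt (binaryStream : Int) (num : Int) : Int :=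
  let n := num + 1
  let L := PySem.Int.bitLength n
  let c := eliasChain L
  (binaryStream <<< (L + c.2)) + ((((c.1 : Int)) <<< L) + n)

-- ===== PRECONDITION & SPEC =====
def Spec_encodeElias (binaryStream : Int) (num : Int) (out : Int) : Prop := out = encodeElias_alt binaryStream num
instance (binaryStream : Int) (num : Int) (out : Int) : Decidable (Spec_encodeElias binaryStream num out) := by unfold Spec_encodeElias; infer_instance

-- ===== CLAIM (what is proved, stated in full; the proofs are below) =====
def Claim_equal_encodeElias : Prop := ∀ (binaryStream : Int) (num : Int), Dom_encodeElias binaryStream num → Spec_encodeElias binaryStream num (encodeElias binaryStream num)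

-- ===== LEMMAS AND PROOFS =====

theorem eliasLoop_eq_chain (P : Nat) : ∀ (bits : Int) (T : Nat),
    eliasLoopA bits T P = (bits + (((eliasChain P).1 : Int)) <<< T, T + (eliasChain P).2) := by
  induction P using Nat.strong_induction_on with
  | _ P ih =>
    intro bits T
    rw [eliasLoopA, eliasChain]
    by_cases h : 1 < P
    · simp only [dif_pos h]
      have hlt : PySem.Int.bitLength ((P - 1 : Nat) : Int) < P := by
        have := pvBitLen_le (P - 1) (by omega); omega
      rw [ih _ hlt]
      simp only [Prod.mk.injEq]
      constructor
      · simp only [Nat.shiftLeft_eq, Int.shiftLeft_eq]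
        push_cast
        ring
      · omega
    · simp [dif_neg h]

-- ===== VERDICT (by name: the statement is the Claim_ definition above) =====
theorem encodeElias_spec : Claim_equal_encodeElias := by
  intro binaryStream num _
  simp only [Spec_encodeElias, encodeElias, encodeElias_alt, eliasLoop_eq_chain]
  ring
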